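-- pv_equiv track=rewrite | github.com/tomaszbar9/advent_of_code_2024 | day_09.py | big_nums_gen
-- ===== SOURCE A (Python) =====
-- def big_nums_gen(d):
--     last_number = (len(d) - 1) // 2
--     if len(d) % 2 == 0:
--         d = d[:-1]
--     for idx in range(len(d) - 1, -1, -2):
--         for _ in range(int(d[idx])):
--             yield last_number
--         last_number -= 1
-- ===== SOURCE B (Python) =====
-- def big_nums_gen(d):
--     # forward accumulation over even-index chars, then reversed emission
--     blocks = []
--     for i, ch in enumerate(d):
--         if i % 2 == 0:
--             blocks.extend([i // 2] * int(ch))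
--     yield from reversed(blocks)
-- ===== Notes on version B (the rewrite author's own statement) =====
-- stated objective: alternative
-- what changed: B makes one forward pass over enumerate(d), accumulating [i//2]*int(ch) blocks for even positions into a list, and yields that list reversed, instead of A's backward index scan range(len-1,-1,-2) with a decrementing file-id counter and nested yield loop.
import Mathlib
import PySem

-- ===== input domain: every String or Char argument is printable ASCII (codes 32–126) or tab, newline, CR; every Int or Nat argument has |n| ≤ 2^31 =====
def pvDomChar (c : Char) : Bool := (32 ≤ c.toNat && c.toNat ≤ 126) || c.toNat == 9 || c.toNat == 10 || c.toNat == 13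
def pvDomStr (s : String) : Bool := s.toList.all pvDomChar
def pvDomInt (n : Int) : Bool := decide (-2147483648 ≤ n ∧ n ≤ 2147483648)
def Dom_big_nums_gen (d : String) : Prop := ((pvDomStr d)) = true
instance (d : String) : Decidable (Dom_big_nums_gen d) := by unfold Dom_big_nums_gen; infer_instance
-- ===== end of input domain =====

-- B builds the block list forwards (one pass over enumerate(d), even positions only) and
-- emits it reversed, instead of A's backward step-(-2) index scan with a decrementing counter;
-- alternative decomposition, same cost (both are Python generators; return-value equivalence).

-- ===== PORT A =====
-- inner 'for _ in range(int(d[idx])): yield last_number' + 'last_number -= 1' as one fold step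
def pvStepA (l : List Char) (st : List Int × Int) (idx : Int) : List Int × Int :=
  (st.1 ++ List.replicate (((PySem.List.pyGet? l idx).bind fun c => PySem.Int.ofChars? [c]).getD 0).toNat st.2,
   st.2 - 1)

def big_nums_gen (d : String) : List Int :=
  let last_number : Int := PySem.Int.floordiv (PySem.Str.len d - 1) 2
  let l : List Char :=
    if PySem.Int.mod (PySem.Str.len d) 2 = 0 then PySem.List.slice d.toList none (some (-1)) else d.toList
  ((PySem.List.pyRange ((l.length : Int) - 1) (-1) (-2)).foldl (pvStepA l) ([], last_number)).1

-- ===== PORT B =====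
-- 'if i % 2 == 0: blocks.extend([i // 2] * int(ch))' as one fold step
def pvStepB (blocks : List Int) (p : Int × Char) : List Int :=
  if PySem.Int.mod p.1 2 = 0 then
    blocks ++ List.replicate ((PySem.Int.ofChars? [p.2]).getD 0).toNat (PySem.Int.floordiv p.1 2)
  else blocks

def big_nums_gen_alt (d : String) : List Int :=
  ((PySem.List.enumerate d.toList).foldl pvStepB []).reverse

-- ===== PRECONDITION & SPEC =====
-- Pre_ excludes exactly the strings with a non-digit character at an even index: there
-- the Python A (a generator) raises ValueError on int() during iteration.
-- (The Lean ports agree on ALL inputs — the proof below does not need Pre_ — it only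
-- delimits where the Pythons return normally.)
def Pre_big_nums_gen (d : String) : Prop :=
  ∀ i, i < d.toList.length → i % 2 = 0 → (d.toList.getD i ' ').isDigit = true
instance (d : String) : Decidable (Pre_big_nums_gen d) := by unfold Pre_big_nums_gen; infer_instance
def pvWitness_big_nums_gen : String := "123"

def Spec_big_nums_gen (d : String) (out : List Int) : Prop := out = big_nums_gen_alt d
instance (d : String) (out : List Int) : Decidable (Spec_big_nums_gen d out) := by unfold Spec_big_nums_gen; infer_instance

-- ===== CLAIM (what is proved, stated in full; the proofs are below) =====
def Claim_equal_big_nums_gen : Prop := ∀ (d : String), Dom_big_nums_gen d → Pre_big_nums_gen d → Spec_big_nums_gen d (big_nums_gen d)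

-- ===== LEMMAS AND PROOFS =====

-- int() of the character, defaulted (both ports build this same value)
def pvVal (c : Char) : Nat := ((PySem.Int.ofChars? [c]).getD 0).toNat

-- the characters at even indices (the file-length digits)
def pvFiles : List Char → List Char
  | [] => []
  | [c] => [c]
  | c :: _ :: t => c :: pvFiles t

-- forward block list: file k of size pvVal c contributes (pvVal c) copies of k
def pvFwd : List Char → Int → List Int
  | [], _ => []
  | c :: t, k => List.replicate (pvVal c) k ++ pvFwd t (k + 1)

-- A's loop as a pure function of its index list
def pvSpecFold (l : List Char) : List Int → Int → List Int
  | [], _ => []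
  | k :: ks, s =>
      List.replicate (((PySem.List.pyGet? l k).bind fun c => PySem.Int.ofChars? [c]).getD 0).toNat s
        ++ pvSpecFold l ks (s - 1)

theorem pvFoldl_spec (l : List Char) (ks : List Int) : ∀ (acc : List Int) (s : Int),
    (ks.foldl (pvStepA l) (acc, s)).1 = acc ++ pvSpecFold l ks s := by
  induction ks with
  | nil => intro acc s; simp [pvSpecFold]
  | cons k ks ih =>
      intro acc s
      simp only [List.foldl_cons, pvStepA, pvSpecFold]
      rw [ih]
      simp

theorem pvRange_cons (j : Nat) : PySem.List.pyRange (2 * (j + 1) : Int) (-1) (-2)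
    = (2 * (j + 1) : Int) :: PySem.List.pyRange (2 * j : Int) (-1) (-2) := by
  simp only [PySem.List.pyRange]
  norm_num
  have h1 : ((2 * (j + 1) : Int) + 1 + 2 - 1) / 2 = (j : Int) + 2 := by omega
  have h2 : ((2 * (j : Int)) + 1 + 2 - 1) / 2 = (j : Int) + 1 := by omega
  rw [h1, h2]
  have e1 : ((j : Int) + 2).toNat = j + 2 := by omega
  have e2 : ((j : Int) + 1).toNat = j + 1 := by omega
  rw [e1, e2]
  rw [if_pos (by omega), if_pos (by omega)]
  rw [List.range_succ_eq_map]
  simp only [List.map_cons, List.map_map]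
  congr 1
  apply List.map_congr_left; intro k hk
  simp only [Function.comp_apply, Nat.succ_eq_add_one]
  push_cast; ring

theorem pvRange_zero : PySem.List.pyRange 0 (-1) (-2) = [0] := by decide

theorem pvFiles_getElem? (t : List Char) (k : Nat) : (pvFiles t)[k]? = t[2 * k]? := by
  induction t using pvFiles.induct generalizing k with
  | case1 => simp [pvFiles]
  | case2 c =>
      match k with
      | 0 => simp [pvFiles]
      | k + 1 => simp [pvFiles]
  | case3 c c' t ih =>
      match k with
      | 0 => simp [pvFiles]
      | k + 1 =>
          have h2 : 2 * (k + 1) = 2 * k + 1 + 1 := by omega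
          simp only [pvFiles, h2, List.getElem?_cons_succ]
          exact ih k

theorem pvFiles_length (t : List Char) : (pvFiles t).length = (t.length + 1) / 2 := by
  induction t using pvFiles.induct with
  | case1 => simp [pvFiles]
  | case2 c => simp [pvFiles]
  | case3 c c' t ih => simp [pvFiles, ih]; omega

theorem pvFiles_dropLast (t : List Char) (h : t.length % 2 = 0) :
    pvFiles t.dropLast = pvFiles t := by
  induction t using pvFiles.induct with
  | case1 => simp
  | case2 c => simp at h
  | case3 c c' t ih =>
      match t with
      | [] => simp [pvFiles]
      | x :: t' =>
          have h' : (x :: t').length % 2 = 0 := by simp at h ⊢; omega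
          have hd : (c :: c' :: x :: t').dropLast = c :: c' :: (x :: t').dropLast := by
            simp [List.dropLast_cons_of_ne_nil]
          rw [hd]
          simp only [pvFiles]
          rw [ih h']

theorem pvFwd_append (F G : List Char) : ∀ k : Int,
    pvFwd (F ++ G) k = pvFwd F k ++ pvFwd G (k + F.length) := by
  induction F with
  | nil => intro k; simp [pvFwd]
  | cons c F ih =>
      intro k
      simp only [List.cons_append, pvFwd, ih, List.append_assoc, List.length_cons]
      congr 3
      push_cast; ring

theorem pvChunk (t : List Char) : ∀ (j : Nat), 2 * j < t.length →
    pvSpecFold t (PySem.List.pyRange (2 * j : Int) (-1) (-2)) (j : Int)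
      = (pvFwd ((pvFiles t).take (j + 1)) 0).reverse := by
  intro j
  induction j with
  | zero =>
      intro hj
      have e0 : (2 * ((0 : Nat) : Int)) = 0 := by norm_num
      rw [e0, pvRange_zero]
      have hget : PySem.List.pyGet? t 0 = t[0]? := by
        rw [PySem.List.pyGet?_of_nonneg t (by norm_num)]; norm_num
      have ht0 : t[0]? = some (t[0]'(by omega)) := List.getElem?_eq_getElem (by omega)
      have hf0 : (pvFiles t)[0]? = some (t[0]'(by omega)) := by
        rw [pvFiles_getElem? t 0]; simp
      simp only [pvSpecFold, hget, ht0, Option.bind_some, List.take_add_one, List.take_zero,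
        List.nil_append, hf0, Option.toList_some, pvFwd, List.append_nil, List.reverse_replicate]
      norm_num [pvVal]
  | succ j ih =>
      intro hj
      have hj' : 2 * j < t.length := by omega
      have ecast : (2 * ((j + 1 : Nat) : Int)) = 2 * ((j : Int) + 1) := by push_cast; ring
      rw [ecast, pvRange_cons j]
      have hidx : (0 : Int) ≤ 2 * ((j : Int) + 1) := by positivity
      have htn : (2 * ((j : Int) + 1)).toNat = 2 * (j + 1) := by omega
      have hget : PySem.List.pyGet? t (2 * ((j : Int) + 1)) = t[2 * (j + 1)]? := by
        rw [PySem.List.pyGet?_of_nonneg t hidx, htn]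
      have htj : t[2 * (j + 1)]? = some (t[2 * (j + 1)]'(by omega)) := List.getElem?_eq_getElem (by omega)
      have hfj : (pvFiles t)[j + 1]? = some (t[2 * (j + 1)]'(by omega)) := by
        rw [pvFiles_getElem? t (j + 1)]; exact htj
      have hlen : j + 1 ≤ (pvFiles t).length := by
        rw [pvFiles_length]; omega
      simp only [pvSpecFold, hget, htj, Option.bind_some]
      have es : (((j + 1 : Nat) : Int) - 1) = (j : Int) := by push_cast; ring
      rw [es, ih hj']
      -- right-hand side: peel the last file off the take
      rw [List.take_add_one (i := j + 1), pvFwd_append, hfj]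
      have hltake : ((pvFiles t).take (j + 1)).length = j + 1 := List.length_take_of_le hlen
      simp only [Option.toList_some, hltake, pvFwd, List.append_nil, List.reverse_append,
        List.reverse_replicate]
      simp [pvVal]

theorem pvBFold (cs : List Char) : ∀ (k : Int) (acc : List Int),
    (PySem.List.enumerate cs (2 * k)).foldl pvStepB acc = acc ++ pvFwd (pvFiles cs) k := by
  induction cs using pvFiles.induct with
  | case1 => intro k acc; simp [PySem.List.enumerate, pvFiles, pvFwd]
  | case2 c =>
      intro k acc
      have hmod : PySem.Int.mod (2 * k) 2 = 0 := by
        rw [PySem.Int.mod_eq_emod_of_pos (by norm_num)]; omega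
      have hdiv : PySem.Int.floordiv (2 * k) 2 = k := by
        rw [PySem.Int.floordiv_eq_ediv_of_pos (by norm_num)]; omega
      simp [PySem.List.enumerate, pvStepB, pvFiles, pvFwd, pvVal]
  | case3 c c' t ih =>
      intro k acc
      have hmod : PySem.Int.mod (2 * k) 2 = 0 := by
        rw [PySem.Int.mod_eq_emod_of_pos (by norm_num)]; omega
      have hmod1 : PySem.Int.mod (2 * k + 1) 2 ≠ 0 := by
        rw [PySem.Int.mod_eq_emod_of_pos (by norm_num)]; omega
      have hdiv : PySem.Int.floordiv (2 * k) 2 = k := by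
        rw [PySem.Int.floordiv_eq_ediv_of_pos (by norm_num)]; omega
      have e2 : (2 * k + 1 + 1) = 2 * (k + 1) := by ring
      rw [PySem.List.enumerate_cons, PySem.List.enumerate_cons, e2]
      simp only [List.foldl_cons]
      rw [show pvStepB acc (2 * k, c)
            = acc ++ List.replicate (pvVal c) k by simp [pvStepB, pvVal]]
      rw [show pvStepB (acc ++ List.replicate (pvVal c) k) (2 * k + 1, c')
            = acc ++ List.replicate (pvVal c) k by simp [pvStepB]]
      rw [ih (k + 1)]
      simp [pvFiles, pvFwd]

theorem pvMain (d : String) : big_nums_gen d = big_nums_gen_alt d := by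
  have hB : big_nums_gen_alt d = (pvFwd (pvFiles d.toList) 0).reverse := by
    unfold big_nums_gen_alt
    have := pvBFold d.toList 0 []
    norm_num at this
    rw [this]
  rw [hB]
  unfold big_nums_gen
  rw [PySem.Str.len_eq]
  set l := d.toList with hl
  by_cases h0 : l.length = 0
  · have hnil : l = [] := List.eq_nil_of_length_eq_zero h0
    rw [hnil]
    simp [pvFiles, pvFwd]
    decide
  · -- n ≥ 1
    set n := l.length with hn
    set m := (n - 1) / 2 with hm
    have hlast : PySem.Int.floordiv ((n : Int) - 1) 2 = (m : Int) := by
      have : ((n : Int) - 1) = ((n - 1 : Nat) : Int) := by omega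
      rw [this, show (2 : Int) = ((2 : Nat) : Int) by norm_num, PySem.Int.floordiv_natCast]
    have hmodn : PySem.Int.mod (n : Int) 2 = ((n % 2 : Nat) : Int) := by
      rw [show (2 : Int) = ((2 : Nat) : Int) by norm_num, PySem.Int.mod_natCast]
    -- the trimmed list and its even-index characters
    have key : ∀ (t : List Char), t.length = 2 * m + 1 → pvFiles t = pvFiles l →
        ((PySem.List.pyRange ((t.length : Int) - 1) (-1) (-2)).foldl (pvStepA t)
            ([], PySem.Int.floordiv ((n : Int) - 1) 2)).1
          = (pvFwd (pvFiles l) 0).reverse := by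
      intro t ht hfe
      rw [hlast, pvFoldl_spec]
      have e : ((t.length : Int) - 1) = (2 * m : Int) := by rw [ht]; push_cast; ring
      rw [e]
      rw [pvChunk t m (by omega)]
      have hflen : (pvFiles t).length = m + 1 := by rw [pvFiles_length, ht]; omega
      rw [List.take_of_length_le (by omega), hfe]
      simp
    by_cases hpar : n % 2 = 0
    · rw [if_pos (by rw [hmodn, hpar]; norm_num)]
      rw [PySem.List.slice_to_neg_one]
      exact key l.dropLast (by rw [List.length_dropLast]; omega) (pvFiles_dropLast l hpar)
    · rw [if_neg (by rw [hmodn]; omega)]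
      exact key l (by omega) rfl

-- ===== VERDICT (by name: the statement is the Claim_ definition above) =====
theorem big_nums_gen_spec : Claim_equal_big_nums_gen := by
  intro d _ _
  exact pvMain d
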